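-- pv_equiv track=rewrite | github.com/MicrosoftDocs/dynamics-365-customer-engagement | change_ms_reviewer.py | find_metadata_block
-- ===== SOURCE A (Python) =====
-- def find_metadata_block(lines):
--     """
--     Find the start and end indices of the metadata block in a Markdown file.
--
--     Args:
--         lines (list of str): Lines of the file.
--
--     Returns:
--         tuple: (start_index, end_index) of metadata block, or (None, None) if not found.
--     """
--     start, end = None, None
--     for i, line in enumerate(lines):
--         if line.strip() == "---" and start is None:
--             start = i
--         elif line.strip() == "---" and start is not None:
--             end = i
--             break
--     return start, end
-- ===== SOURCE B (Python) =====
-- def find_metadata_block(lines):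
--     idx = [i for i, line in enumerate(lines) if line.strip() == "---"]
--     start = idx[0] if idx else None
--     end = idx[1] if len(idx) >= 2 else None
--     return start, end
-- ===== Notes on version B (the rewrite author's own statement) =====
-- stated objective: simpler
-- what changed: Replaces the stateful early-exit scan with a comprehension collecting all '---' delimiter indices, then reads the first two positions of that list.
import Mathlib
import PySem

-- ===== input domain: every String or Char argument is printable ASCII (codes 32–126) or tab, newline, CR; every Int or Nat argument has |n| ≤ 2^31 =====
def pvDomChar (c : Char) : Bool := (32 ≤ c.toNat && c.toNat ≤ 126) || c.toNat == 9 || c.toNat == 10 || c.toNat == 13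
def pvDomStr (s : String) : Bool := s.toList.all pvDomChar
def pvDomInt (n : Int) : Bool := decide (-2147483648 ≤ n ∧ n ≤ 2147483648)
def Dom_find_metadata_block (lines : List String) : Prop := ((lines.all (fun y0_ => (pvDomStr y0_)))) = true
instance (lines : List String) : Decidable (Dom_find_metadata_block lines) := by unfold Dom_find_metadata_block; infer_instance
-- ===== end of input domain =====

-- B collects all '---' delimiter indices in one comprehension and reads the first two; same results, simpler shape.

-- ===== PORT A =====
-- A's for-loop with early break, as structural recursion over enumerate's tail, carrying `start`.
def findMetaLoopA : List (Int × String) → Option Int → Option Int × Option Int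
  | [], start => (start, none)
  | (i, line) :: rest, start =>
    if PySem.Str.strip line == "---" && start.isNone then
      findMetaLoopA rest (some i)
    else if PySem.Str.strip line == "---" && !start.isNone then
      (start, some i)          -- end = i; break
    else
      findMetaLoopA rest start

def find_metadata_block (lines : List String) : Option Int × Option Int :=
  findMetaLoopA (PySem.List.enumerate lines) none

-- ===== PORT B =====
def find_metadata_block_alt (lines : List String) : Option Int × Option Int :=
  let idx := ((PySem.List.enumerate lines).filter (fun p => PySem.Str.strip p.2 == "---")).map (fun p => p.1)
  let start := if idx ≠ [] then idx[0]? else none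
  let «end» := if idx.length ≥ 2 then idx[1]? else none
  (start, «end»)

-- ===== PRECONDITION & SPEC =====
def Spec_find_metadata_block (lines : List String) (out : Option Int × Option Int) : Prop := out = find_metadata_block_alt lines
instance (lines : List String) (out : Option Int × Option Int) : Decidable (Spec_find_metadata_block lines out) := by unfold Spec_find_metadata_block; infer_instance

-- ===== CLAIM (what is proved, stated in full; the proofs are below) =====
def Claim_equal_find_metadata_block : Prop := ∀ (lines : List String), Dom_find_metadata_block lines → Spec_find_metadata_block lines (find_metadata_block lines)

-- ===== LEMMAS AND PROOFS =====

-- Characterisation of A's loop via the filtered index list of the remaining pairs.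
theorem findMetaLoopA_eq (ps : List (Int × String)) :
    (∀ s, findMetaLoopA ps (some s) =
      (some s, ((ps.filter (fun p => PySem.Str.strip p.2 == "---")).map (fun p => p.1))[0]?)) ∧
    findMetaLoopA ps none =
      (let idx := (ps.filter (fun p => PySem.Str.strip p.2 == "---")).map (fun p => p.1)
       (idx[0]?, idx[1]?)) := by
  induction ps with
  | nil => simp [findMetaLoopA]
  | cons hd tl ih =>
    obtain ⟨ihS, ihN⟩ := ih
    constructor
    · intro s
      by_cases h : PySem.Str.strip hd.2 == "---"
      · simp [findMetaLoopA, h]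
      · simp [findMetaLoopA, h, ihS]
    · by_cases h : PySem.Str.strip hd.2 == "---"
      · simp [findMetaLoopA, h, ihS]
      · simp [findMetaLoopA, h, ihN]

-- ===== VERDICT (by name: the statement is the Claim_ definition above) =====
theorem find_metadata_block_spec : Claim_equal_find_metadata_block := by
  intro lines _
  unfold Spec_find_metadata_block find_metadata_block find_metadata_block_alt
  rw [(findMetaLoopA_eq (PySem.List.enumerate lines)).2]
  set idx := ((PySem.List.enumerate lines).filter (fun p => PySem.Str.strip p.2 == "---")).map (fun p => p.1) with hidx
  simp only []
  congr 1
  · rcases idx with _ | ⟨a, t⟩ <;> simp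
  · rcases idx with _ | ⟨a, _ | ⟨b, t⟩⟩ <;> simp
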